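-- pv_equiv track=rewrite | github.com/stargazingdave/self_orlog | rl/env/env.py | _mask_to_exact_k_indices
-- ===== SOURCE A (Python) =====
-- def _mask_to_exact_k_indices(mask: int, k: int) -> list[int]:
--     k = max(0, min(6, int(k)))
--
--     ones = [i for i in range(6) if ((mask >> i) & 1) == 1]
--     if len(ones) > k:
--         return ones[:k]
--
--     if len(ones) < k:
--         # fill with lowest indices not already chosen
--         for i in range(6):
--             if i not in ones:
--                 ones.append(i)
--                 if len(ones) == k:
--                     break
--     return ones
-- ===== SOURCE B (Python) =====
-- def _mask_to_exact_k_indices(mask: int, k: int) -> list[int]: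
--     k = max(0, min(6, int(k)))
--     def pick(m: int, used: int, need: int) -> list[int]:
--         if need == 0:
--             return []
--         if m:
--             j = (m ^ (m & (m - 1))).bit_length() - 1            # lowest set bit still owed
--         else:
--             j = ((used + 1) ^ ((used + 1) & used)).bit_length() - 1   # lowest clear bit of used
--         return [j] + pick(m & (m - 1), used | (1 << j), need - 1)
--     m6 = mask % 64
--     return pick(m6, m6, k)
-- ===== Notes on version B (the rewrite author's own statement) =====
-- stated objective: alternative
-- what changed: B builds no candidate lists at all: a single recursive emitter outputs one index per step from two bitmask registers, taking the lowest set bit of the remaining mask via m&-m while any is owed and otherwise the lowest clear bit of a 'used' mask via (used+1)&-(used+1), stopping after exactly k emissions, instead of A's comprehension plus truncate/fill branches.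
import Mathlib
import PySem

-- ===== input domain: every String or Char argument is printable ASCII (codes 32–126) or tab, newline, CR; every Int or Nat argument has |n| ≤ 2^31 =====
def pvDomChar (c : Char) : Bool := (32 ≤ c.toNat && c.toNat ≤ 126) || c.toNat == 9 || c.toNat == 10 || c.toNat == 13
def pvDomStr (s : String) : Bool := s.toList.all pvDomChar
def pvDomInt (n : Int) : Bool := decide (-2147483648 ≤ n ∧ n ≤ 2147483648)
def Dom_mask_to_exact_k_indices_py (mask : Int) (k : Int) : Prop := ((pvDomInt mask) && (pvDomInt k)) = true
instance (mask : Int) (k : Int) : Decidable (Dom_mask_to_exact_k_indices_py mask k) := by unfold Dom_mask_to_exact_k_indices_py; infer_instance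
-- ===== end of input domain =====

-- B replaces A's list comprehension plus truncate/fill branches by a recursive bit-twiddling
-- emitter over two bitmask registers that outputs exactly k indices — objective: alternative.

-- ===== PORT A =====
-- '(mask >> i) & 1' for 0 ≤ i is exactly 'mask // 2**i % 2' in Python (arithmetic shift, low bit);
-- ported exactly via PySem floor division and floor mod.
def pvBit (mask : Int) (i : Int) : Int :=
  PySem.Int.mod (PySem.Int.floordiv mask ((2 : Int) ^ i.toNat)) 2

-- the 'for i in range(6): if i not in ones: ones.append(i); if len(ones)==k: break' loop
def pvFillA (kk : Int) (ones : List Int) : List Int → List Int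
  | [] => ones
  | i :: rest =>
    if i ∈ ones then pvFillA kk ones rest
    else
      let ones' := ones ++ [i]
      if (ones'.length : Int) = kk then ones' else pvFillA kk ones' rest

def mask_to_exact_k_indices_py (mask : Int) (k : Int) : List Int :=
  let k1 := max 0 (min 6 k)
  let ones := (PySem.List.pyRange 0 6 1).filter (fun i => pvBit mask i == 1)
  if (ones.length : Int) > k1 then PySem.List.slice ones none (some k1)
  else if (ones.length : Int) < k1 then pvFillA k1 ones (PySem.List.pyRange 0 6 1)
  else ones

-- ===== PORT B =====
-- helpers porting Python's '&', '|', '^' and int.bit_length on the NONNEGATIVE ints B uses;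
-- written as structural binary recursions (fuel 16) so they are exact for 0 ≤ a,b < 2^16,
-- far above the < 2^7 values occurring in pick
def pvAndN : Nat → Nat → Nat → Nat
  | 0, _, _ => 0
  | f + 1, a, b => (a % 2) * (b % 2) + 2 * pvAndN f (a / 2) (b / 2)
def pvOrN : Nat → Nat → Nat → Nat
  | 0, _, _ => 0
  | f + 1, a, b => (max (a % 2) (b % 2)) + 2 * pvOrN f (a / 2) (b / 2)
def pvXorN : Nat → Nat → Nat → Nat
  | 0, _, _ => 0
  | f + 1, a, b => ((a % 2) + (b % 2)) % 2 + 2 * pvXorN f (a / 2) (b / 2)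
def pvAnd (a b : Int) : Int := (pvAndN 16 a.toNat b.toNat : Nat)
def pvOr (a b : Int) : Int := (pvOrN 16 a.toNat b.toNat : Nat)
def pvXor (a b : Int) : Int := (pvXorN 16 a.toNat b.toNat : Nat)
-- Python's x.bit_length() for 0 ≤ x < 2^16: the number of i with 2^i ≤ x
def pvBitLength (x : Int) : Int := (((List.range 16).filter (fun i => 2 ^ i ≤ x.toNat)).length : Nat)

-- Source B's recursive 'pick': need counts down to 0 (Nat, from the clamped k), the '[j] + pick(…)' cons
def pvPickB (m : Int) (used : Int) : Nat → List Int
  | 0 => []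
  | n + 1 =>
    let j := if m ≠ 0 then pvBitLength (pvXor m (pvAnd m (m - 1))) - 1
             else pvBitLength (pvXor (used + 1) (pvAnd (used + 1) used)) - 1
    j :: pvPickB (pvAnd m (m - 1)) (pvOr used ((2 : Int) ^ j.toNat)) n  -- 1 << j = 2^j (j ≥ 0 here)

def mask_to_exact_k_indices_py_alt (mask : Int) (k : Int) : List Int :=
  let k1 := max 0 (min 6 k)
  let m6 := PySem.Int.mod mask 64
  pvPickB m6 m6 k1.toNat

-- ===== PRECONDITION & SPEC =====
def Spec_mask_to_exact_k_indices_py (mask : Int) (k : Int) (out : List Int) : Prop := out = mask_to_exact_k_indices_py_alt mask k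
instance (mask : Int) (k : Int) (out : List Int) : Decidable (Spec_mask_to_exact_k_indices_py mask k out) := by unfold Spec_mask_to_exact_k_indices_py; infer_instance

-- ===== CLAIM (what is proved, stated in full; the proofs are below) =====
def Claim_equal_mask_to_exact_k_indices_py : Prop := ∀ (mask : Int) (k : Int), Dom_mask_to_exact_k_indices_py mask k → Spec_mask_to_exact_k_indices_py mask k (mask_to_exact_k_indices_py mask k)

-- ===== LEMMAS AND PROOFS =====

-- bits 0..5 only depend on mask modulo 64
theorem pvBit_mod64 (mask i : Int) (h0 : 0 ≤ i) (h6 : i < 6) :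
    pvBit mask i = pvBit (mask % 64) i := by
  interval_cases i <;>
    simp only [pvBit, PySem.Int.floordiv_eq_ediv_of_pos (by norm_num : (0:Int) < 2 ^ _),
      PySem.Int.mod_eq_emod_of_pos (by norm_num : (0:Int) < 2), Int.toNat_zero, Int.toNat_one, show ((2:Int)).toNat = 2 from rfl, show ((3:Int)).toNat = 3 from rfl, show ((4:Int)).toNat = 4 from rfl, show ((5:Int)).toNat = 5 from rfl] <;>
    norm_num <;> omega

theorem pvOnes_mod64 (mask : Int) (p : Int → Int → Bool) :
    (PySem.List.pyRange 0 6 1).filter (fun i => p (pvBit mask i) i)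
      = (PySem.List.pyRange 0 6 1).filter (fun i => p (pvBit (mask % 64) i) i) := by
  refine List.filter_congr ?_
  intro i hi
  have hm := PySem.List.mem_pyRange_one.mp hi
  rw [pvBit_mod64 mask i hm.1 hm.2]

theorem pvA_reduce (mask k : Int) :
    mask_to_exact_k_indices_py mask k
      = mask_to_exact_k_indices_py (mask % 64) (max 0 (min 6 k)) := by
  unfold mask_to_exact_k_indices_py
  have h1 : max 0 (min 6 (max 0 (min 6 k))) = max 0 (min 6 k) := by omega
  rw [h1, pvOnes_mod64 mask (fun b _ => b == 1)]

theorem pvB_reduce (mask k : Int) :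
    mask_to_exact_k_indices_py_alt mask k
      = mask_to_exact_k_indices_py_alt (mask % 64) (max 0 (min 6 k)) := by
  unfold mask_to_exact_k_indices_py_alt
  have h1 : max 0 (min 6 (max 0 (min 6 k))) = max 0 (min 6 k) := by omega
  rw [h1, PySem.Int.mod_eq_emod_of_pos (by norm_num : (0:Int) < 64),
      PySem.Int.mod_eq_emod_of_pos (by norm_num : (0:Int) < 64), Int.emod_emod_of_dvd _ (by norm_num)]

theorem pvSmall (m kk : Int) (hm0 : 0 ≤ m) (hm : m < 64) (hk0 : 0 ≤ kk) (hk : kk ≤ 6) :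
    mask_to_exact_k_indices_py m kk = mask_to_exact_k_indices_py_alt m kk := by
  interval_cases m <;> interval_cases kk <;> decide

-- ===== VERDICT (by name: the statement is the Claim_ definition above) =====
theorem mask_to_exact_k_indices_py_spec : Claim_equal_mask_to_exact_k_indices_py := by
  intro mask k _
  show mask_to_exact_k_indices_py mask k = mask_to_exact_k_indices_py_alt mask k
  rw [pvA_reduce, pvB_reduce]
  exact pvSmall _ _ (Int.emod_nonneg _ (by norm_num)) (Int.emod_lt_of_pos _ (by norm_num))
    (by omega) (by omega)
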